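-- pv_equiv track=rewrite | github.com/meghazii/KMR-S6 | sample/algo/NaifAlgo.py | naiveExtraction
-- ===== SOURCE A (Python) =====
-- def naiveExtraction(text , longMotif):    #Methode representant l'algo naif d'extraction de motif
--     result = False
--     for i in range(0,(len(text) - longMotif) + 1):    #Toutes les lettres pouvant posséder le motif
--         #print ("i = %d" % (i, ))
--         message = ''
--         motif = text[i:i+longMotif]
--         for j in range(i+1,(len(text) - longMotif) + 1):
--             ok = True
--             l = 0
--             while ok and l < longMotif:
--                 ok = (motif[l] == text[j + l])
--                 l += 1
--             if (ok):
--                 message = "Le motif: %s apparait aux positions %d " % (motif,i + 1)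
--                 message += ", %d " % (j + 1, )
--         if (message):
--             print (message + ".")
--             result = True
--     return result
-- ===== SOURCE B (Python) =====
-- def naiveExtraction(text, longMotif):
--     # One pass groups start positions by their substring in a dict (last index wins),
--     # then each start that is not its substring's last occurrence is reported once.
--     n = len(text)
--     last = {}
--     for i in range(0, (n - longMotif) + 1):
--         last[text[i:i + longMotif]] = i
--     result = False
--     for i in range(0, (n - longMotif) + 1):
--         motif = text[i:i + longMotif]
--         if last[motif] != i:
--             print("Le motif: %s apparait aux positions %d , %d ." % (motif, i + 1, last[motif] + 1))
--             result = True
--     return result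
-- ===== Notes on version B (the rewrite author's own statement) =====
-- stated objective: faster
-- what changed: Replaces the nested position-by-position rescan (for each start, compare its substring character-wise against every later start) by one dict pass that records the last start index of each substring, then a linear pass reporting every start that is not its substring's last occurrence.
import Mathlib
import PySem

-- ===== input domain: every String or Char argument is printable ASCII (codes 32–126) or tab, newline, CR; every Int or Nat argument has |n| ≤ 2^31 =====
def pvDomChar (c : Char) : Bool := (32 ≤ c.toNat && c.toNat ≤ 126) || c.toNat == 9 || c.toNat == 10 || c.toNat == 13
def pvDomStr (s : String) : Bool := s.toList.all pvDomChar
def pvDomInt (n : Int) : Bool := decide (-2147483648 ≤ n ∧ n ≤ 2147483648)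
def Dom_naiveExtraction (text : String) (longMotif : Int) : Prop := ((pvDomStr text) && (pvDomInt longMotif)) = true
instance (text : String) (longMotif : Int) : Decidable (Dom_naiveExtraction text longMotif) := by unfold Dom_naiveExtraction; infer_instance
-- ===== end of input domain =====

-- B replaces A's nested position-by-position rescan by one dict pass recording each substring's
-- last start index plus one reporting pass (measurably faster); the equivalence proved here is
-- about the RETURN value only — the print side effect is not modelled.

-- ===== PORT A =====
-- A's inner loop 'while ok and l < longMotif: ok = (motif[l] == text[j + l]); l += 1'.
-- On every state this loop reaches, both indices are in range (the Python raises nowhere),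
-- so the total pyGetD with an arbitrary default ' ' is exact here.
def pvAWhile (motif chars : List Char) (j longMotif : Int) (ok : Bool) (l : Int) : Bool :=
  if h : ok = true ∧ l < longMotif then
    pvAWhile motif chars j longMotif
      (PySem.List.pyGetD motif l ' ' == PySem.List.pyGetD chars (j + l) ' ') (l + 1)
  else ok
termination_by (longMotif - l).toNat
decreasing_by omega

def naiveExtraction (text : String) (longMotif : Int) : Bool :=
  let chars := text.toList
  let n : Int := (chars.length : Int)
  (PySem.List.pyRange 0 (n - longMotif + 1)).foldl (fun result i =>
    let motif := PySem.List.slice chars (some i) (some (i + longMotif))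
    let message : List Char :=
      (PySem.List.pyRange (i + 1) (n - longMotif + 1)).foldl (fun message j =>
        let ok := pvAWhile motif chars j longMotif true 0
        if ok then
          ("Le motif: ".toList ++ motif ++ " apparait aux positions ".toList
              ++ (PySem.Int.toStr (i + 1)).toList ++ " ".toList)
            ++ (", ".toList ++ (PySem.Int.toStr (j + 1)).toList ++ " ".toList)
        else message) []
    if message ≠ [] then true else result) false

-- ===== PORT B =====
-- B's first loop: last[text[i:i+longMotif]] = i; second loop: report every start i that is
-- not its substring's last occurrence.  'last[motif]' in B's second loop never raises (the
-- key was inserted by the first loop at this very i), so the total getD with an arbitrary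
-- default 0 is exact here.
def naiveExtraction_alt (text : String) (longMotif : Int) : Bool :=
  let chars := text.toList
  let n : Int := (chars.length : Int)
  let last : PySem.Dict (List Char) Int :=
    (PySem.List.pyRange 0 (n - longMotif + 1)).foldl
      (fun d i => d.insert (PySem.List.slice chars (some i) (some (i + longMotif))) i)
      PySem.Dict.empty
  (PySem.List.pyRange 0 (n - longMotif + 1)).foldl (fun result i =>
    let motif := PySem.List.slice chars (some i) (some (i + longMotif))
    if last.getD motif 0 ≠ i then true else result) false

-- ===== PRECONDITION & SPEC =====
def Spec_naiveExtraction (text : String) (longMotif : Int) (out : Bool) : Prop := out = naiveExtraction_alt text longMotif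
instance (text : String) (longMotif : Int) (out : Bool) : Decidable (Spec_naiveExtraction text longMotif out) := by unfold Spec_naiveExtraction; infer_instance

-- ===== CLAIM (what is proved, stated in full; the proofs are below) =====
def Claim_equal_naiveExtraction : Prop := ∀ (text : String) (longMotif : Int), Dom_naiveExtraction text longMotif → Spec_naiveExtraction text longMotif (naiveExtraction text longMotif)

-- ===== LEMMAS AND PROOFS =====

-- the slice text[i:i+L], on the character list
@[reducible] def pvSl (chars : List Char) (L i : Int) : List Char :=
  PySem.List.slice chars (some i) (some (i + L))

-- 'some length-L slice occurs at two distinct admissible start positions'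
def pvDup (chars : List Char) (L : Int) : Prop :=
  ∃ i j : Int, 0 ≤ i ∧ i < j ∧ j < (chars.length : Int) - L + 1 ∧ pvSl chars L i = pvSl chars L j

-- fold of an 'if P(i): result = True' loop
lemma pv_foldl_ite_true' (l : List Int) (P : Int → Prop) [DecidablePred P] (b : Bool) :
    (l.foldl (fun r i => if P i then true else r) b = true) ↔ (b = true ∨ ∃ i ∈ l, P i) := by
  induction l generalizing b with
  | nil => simp
  | cons x xs ih =>
    simp only [List.foldl_cons, ih, List.mem_cons]
    by_cases h : P x <;> simp [h]

-- fold of A's message loop ends nonempty iff some j matched (each written message is nonempty)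
lemma pv_foldl_msg (l : List Int) (q : Int → Bool) (f : Int → List Char)
    (hf : ∀ j, f j ≠ []) (init : List Char) :
    (l.foldl (fun m j => if q j then f j else m) init ≠ []) ↔ (init ≠ [] ∨ ∃ j ∈ l, q j = true) := by
  induction l generalizing init with
  | nil => simp
  | cons x xs ih =>
    simp only [List.foldl_cons, ih, List.mem_cons]
    by_cases h : q x = true
    · simp [h, hf x]
    · simp only [Bool.not_eq_true] at h
      simp [h]

-- the while loop entered with ok = False returns False
lemma pvAWhile_false (motif chars : List Char) (j L l : Int) :
    pvAWhile motif chars j L false l = false := by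
  rw [pvAWhile]; simp

-- characterisation of A's inner while loop
lemma pvAWhile_iff (motif chars : List Char) (j L : Int) : ∀ (l : Int),
    ((pvAWhile motif chars j L true l = true) ↔
      ∀ m : Int, l ≤ m → m < L →
        PySem.List.pyGetD motif m ' ' = PySem.List.pyGetD chars (j + m) ' ') := by
  intro l
  by_cases hl : l < L
  · have fuel : (L - (l + 1)).toNat < (L - l).toNat := by omega
    rw [pvAWhile, dif_pos (⟨rfl, hl⟩ : true = true ∧ l < L)]
    by_cases hc : PySem.List.pyGetD motif l ' ' = PySem.List.pyGetD chars (j + l) ' '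
    · rw [show (PySem.List.pyGetD motif l ' ' == PySem.List.pyGetD chars (j + l) ' ') = true by
        simp [hc]]
      rw [pvAWhile_iff motif chars j L (l + 1)]
      constructor
      · intro h m hm1 hm2
        rcases eq_or_lt_of_le hm1 with rfl | h'
        · exact hc
        · exact h m (by omega) hm2
      · intro h m hm1 hm2; exact h m (by omega) hm2
    · rw [show (PySem.List.pyGetD motif l ' ' == PySem.List.pyGetD chars (j + l) ' ') = false by
        simp [hc]]
      rw [pvAWhile_false]
      constructor
      · intro h; exact absurd h (by simp)
      · intro h; exact absurd (h l le_rfl hl) hc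
  · rw [pvAWhile, dif_neg (by simp [hl] : ¬(true = true ∧ l < L))]
    constructor
    · intro _ m hm1 hm2; omega
    · intro _; rfl
termination_by l => (L - l).toNat
decreasing_by omega

-- an admissible slice of positive L is a full-length take/drop
lemma pv_sl_len (chars : List Char) (L i : Int) (hL : 1 ≤ L) (hi : 0 ≤ i)
    (hle : i + L ≤ (chars.length : Int)) :
    pvSl chars L i = (chars.drop i.toNat).take L.toNat ∧
      ((chars.drop i.toNat).take L.toNat).length = L.toNat := by
  constructor
  · unfold pvSl
    rw [PySem.List.slice_of_nonneg chars hi (by omega) (by omega) hle]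
    congr 1
    omega
  · simp [List.length_take, List.length_drop]
    omega

-- for L ≥ 1 and admissible i < j, A's while loop decides slice equality
lemma pv_ok_iff_sl (chars : List Char) (L i j : Int) (hL : 1 ≤ L) (hi : 0 ≤ i)
    (hij : i < j) (hj : j + L ≤ (chars.length : Int)) :
    (pvAWhile (pvSl chars L i) chars j L true 0 = true) ↔ pvSl chars L i = pvSl chars L j := by
  obtain ⟨hsi, hleni⟩ := pv_sl_len chars L i hL hi (by omega)
  obtain ⟨hsj, hlenj⟩ := pv_sl_len chars L j hL (by omega) hj
  rw [pvAWhile_iff, hsi, hsj]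
  constructor
  · intro h
    apply List.ext_getElem (by rw [hleni, hlenj])
    intro m hm1 hm2
    have hmL : (m : Int) < L := by rw [hleni] at hm1; omega
    have := h m (by omega) hmL
    rw [PySem.List.pyGetD_eq_getElem _ _ (by omega) (by rw [hsi] at *; push_cast [hleni]; omega)] at this
    rw [PySem.List.pyGetD_eq_getElem _ _ (by omega) (by omega)] at this
    simp only [List.getElem_take, List.getElem_drop, Int.toNat_natCast] at this ⊢
    rw [this]
    congr 1
    omega
  · intro h m hm0 hmL
    rw [h]
    rw [PySem.List.pyGetD_eq_getElem _ _ hm0 (by push_cast [hlenj]; omega)]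
    rw [PySem.List.pyGetD_eq_getElem _ _ (by omega) (by omega)]
    simp only [List.getElem_take, List.getElem_drop]
    congr 1
    omega

-- for L ≤ 0 the last admissible slices are empty
lemma pv_sl_nil (chars : List Char) (L i : Int) (hL : L ≤ 0) (hi : (chars.length : Int) - 1 ≤ i + L) :
    pvSl chars L i = [] := by
  apply List.eq_nil_of_length_eq_zero
  unfold pvSl
  rw [PySem.List.length_slice]
  simp only [PySem.List.clampIdx]
  split_ifs <;> omega

-- the dict built by B's first loop: lookup returns the LAST inserted index for the key
lemma pv_getD_fold (chars : List Char) (L : Int) (l : List Int)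
    (d : PySem.Dict (List Char) Int) (k : List Char) (d0 : Int) :
    (l.foldl (fun d i => d.insert (pvSl chars L i) i) d).getD k d0 =
      match l.reverse.find? (fun i => pvSl chars L i == k) with
      | some i => i
      | none => d.getD k d0 := by
  induction l using List.reverseRecOn generalizing d with
  | nil => simp
  | append_singleton xs x ih =>
    rw [List.foldl_append]
    simp only [List.foldl_cons, List.foldl_nil, List.reverse_append, List.reverse_cons,
      List.reverse_nil, List.nil_append, List.cons_append, List.find?_cons]
    by_cases h : pvSl chars L x == k
    · rw [h]
      rw [PySem.Dict.getD_insert]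
      rw [if_pos (eq_comm.mp (eq_of_beq h))]
    · rw [Bool.not_eq_true] at h
      rw [h]
      rw [PySem.Dict.getD_insert,
        if_neg (by intro hk; subst hk; simp only [beq_self_eq_true] at h; cases h)]
      exact ih d

-- A returns true iff some start has a later match of its motif
lemma pv_A_exists (text : String) (L : Int) :
    naiveExtraction text L = true ↔
      ∃ i, (0 ≤ i ∧ i < (text.toList.length : Int) - L + 1) ∧
        ∃ j, (i + 1 ≤ j ∧ j < (text.toList.length : Int) - L + 1) ∧
          pvAWhile (pvSl text.toList L i) text.toList j L true 0 = true := by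
  have hf : ∀ (i j : Int),
      ("Le motif: ".toList ++ pvSl text.toList L i ++ " apparait aux positions ".toList
          ++ (PySem.Int.toStr (i + 1)).toList ++ " ".toList)
        ++ (", ".toList ++ (PySem.Int.toStr (j + 1)).toList ++ " ".toList) ≠ [] := by
    intro i j
    apply List.append_ne_nil_of_left_ne_nil
    apply List.append_ne_nil_of_left_ne_nil
    apply List.append_ne_nil_of_left_ne_nil
    apply List.append_ne_nil_of_left_ne_nil
    apply List.append_ne_nil_of_left_ne_nil
    decide
  simp only [naiveExtraction]
  rw [pv_foldl_ite_true']
  simp only [Bool.false_eq_true, false_or]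
  constructor
  · rintro ⟨i, hiR, hmsg⟩
    rw [pv_foldl_msg _ _ _ (hf i)] at hmsg
    rcases hmsg with h0 | ⟨j, hjR, hok⟩
    · exact absurd rfl h0
    · rw [PySem.List.mem_pyRange_one] at hiR hjR
      exact ⟨i, hiR, j, hjR, hok⟩
  · rintro ⟨i, hi, j, hj, hok⟩
    refine ⟨i, PySem.List.mem_pyRange_one.mpr hi, ?_⟩
    rw [pv_foldl_msg _ _ _ (hf i)]
    exact Or.inr ⟨j, PySem.List.mem_pyRange_one.mpr hj, hok⟩

-- A returns true iff a duplicate pair of slices exists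
lemma pv_A_iff (text : String) (L : Int) :
    naiveExtraction text L = true ↔ pvDup text.toList L := by
  rw [pv_A_exists]
  unfold pvDup
  by_cases hL : 1 ≤ L
  · constructor
    · rintro ⟨i, ⟨hi0, hiN⟩, j, ⟨hj1, hjN⟩, hok⟩
      exact ⟨i, j, hi0, by omega, hjN,
        (pv_ok_iff_sl text.toList L i j hL hi0 (by omega) (by omega)).mp hok⟩
    · rintro ⟨i, j, hi0, hij, hjN, heq⟩
      exact ⟨i, ⟨hi0, by omega⟩, j, ⟨by omega, hjN⟩,
        (pv_ok_iff_sl text.toList L i j hL hi0 hij (by omega)).mpr heq⟩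
  · have hL' : L ≤ 0 := by omega
    have hok : ∀ (st : List Char) (j : Int), pvAWhile st text.toList j L true 0 = true := by
      intro st j
      rw [pvAWhile_iff]
      intro m hm0 hmL
      exact absurd hmL (by omega)
    constructor
    · rintro ⟨i, ⟨hi0, hiN⟩, j, ⟨hj1, hjN⟩, -⟩
      refine ⟨(text.toList.length : Int) - L - 1, (text.toList.length : Int) - L,
        by omega, by omega, by omega, ?_⟩
      rw [pv_sl_nil _ _ _ hL' (by omega), pv_sl_nil _ _ _ hL' (by omega)]
    · rintro ⟨i, j, hi0, hij, hjN, -⟩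
      exact ⟨i, ⟨hi0, by omega⟩, j, ⟨by omega, hjN⟩, hok _ _⟩

-- B returns true iff a duplicate pair of slices exists
lemma pv_B_iff (text : String) (L : Int) :
    naiveExtraction_alt text L = true ↔ pvDup text.toList L := by
  simp only [naiveExtraction_alt]
  rw [pv_foldl_ite_true']
  simp only [Bool.false_eq_true, false_or]
  unfold pvDup
  set c := text.toList with hc
  set N : Int := (c.length : Int) - L + 1 with hN
  constructor
  · rintro ⟨i, hiR, hne⟩
    rw [PySem.List.mem_pyRange_one] at hiR
    rw [pv_getD_fold] at hne
    have hne2 : (match (PySem.List.pyRange 0 N).reverse.find? (fun x => pvSl c L x == pvSl c L i) with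
        | some x => x
        | none => PySem.Dict.empty.getD (pvSl c L i) 0) ≠ i := hne
    clear hne
    cases hfind : (PySem.List.pyRange 0 N).reverse.find? (fun x => pvSl c L x == pvSl c L i) with
    | none =>
      exfalso
      have := List.find?_eq_none.mp hfind i
        (List.mem_reverse.mpr (PySem.List.mem_pyRange_one.mpr hiR))
      simp at this
    | some m =>
      rw [hfind] at hne2
      have hpm0 := List.find?_some hfind
      have hpm : pvSl c L m = pvSl c L i := by simpa using hpm0
      have hne' : m ≠ i := hne2
      have hmR : m ∈ PySem.List.pyRange 0 N :=
        List.mem_reverse.mp (List.mem_of_find?_eq_some hfind)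
      rw [PySem.List.mem_pyRange_one] at hmR
      rcases lt_or_gt_of_ne hne' with h | h
      · exact ⟨m, i, by omega, h, by omega, hpm⟩
      · exact ⟨i, m, by omega, h, by omega, hpm.symm⟩
  · rintro ⟨i, j, hi0, hij, hjN, heq⟩
    refine ⟨i, PySem.List.mem_pyRange_one.mpr ⟨hi0, by omega⟩, ?_⟩
    rw [pv_getD_fold]
    show (match (PySem.List.pyRange 0 N).reverse.find? (fun x => pvSl c L x == pvSl c L i) with
        | some x => x
        | none => PySem.Dict.empty.getD (pvSl c L i) 0) ≠ i
    cases hfind : (PySem.List.pyRange 0 N).reverse.find? (fun x => pvSl c L x == pvSl c L i) with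
    | none =>
      exfalso
      have := List.find?_eq_none.mp hfind i
        (List.mem_reverse.mpr (PySem.List.mem_pyRange_one.mpr ⟨hi0, by omega⟩))
      simp at this
    | some m =>
      show m ≠ i
      -- m is the LAST match; j also matches and j > i, so m ≥ j > i
      obtain ⟨hpm, as, bs, hsplit, has⟩ := List.find?_eq_some_iff_append.mp hfind
      have hjmem : j ∈ (PySem.List.pyRange 0 N).reverse :=
        List.mem_reverse.mpr (PySem.List.mem_pyRange_one.mpr ⟨by omega, hjN⟩)
      have hpj : (fun x => pvSl c L x == pvSl c L i) j = true := by
        simp only [beq_iff_eq]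
        exact heq.symm
      have hpair : ((PySem.List.pyRange 0 N).reverse).Pairwise (fun a b => b < a) := by
        rw [List.pairwise_reverse]
        exact PySem.List.pairwise_lt_pyRange_one 0 N
      rw [hsplit] at hjmem hpair
      have hmbs : ∀ b ∈ bs, b < m := by
        have := (List.pairwise_append.mp hpair).2.1
        exact fun b hb => (List.pairwise_cons.mp this).1 b hb
      have hjm : j ≤ m := by
        rcases List.mem_append.mp hjmem with hja | hjc
        · exact absurd hpj (by simpa using has j hja)
        · rcases List.mem_cons.mp hjc with hjeq | hjb
          · omega
          · exact le_of_lt (hmbs j hjb)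
      omega

-- ===== VERDICT (by name: the statement is the Claim_ definition above) =====
theorem naiveExtraction_spec : Claim_equal_naiveExtraction := by
  intro text L _
  unfold Spec_naiveExtraction
  have := (pv_A_iff text L).trans (pv_B_iff text L).symm
  cases hA : naiveExtraction text L <;> cases hB : naiveExtraction_alt text L <;> simp_all
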